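-- pv_equiv track=rewrite | github.com/SurajSaravanan/Personal-Projects | Midterm.py | listunique
-- ===== SOURCE A (Python) =====
-- def listunique(lst):
--     newuniquelist = []
--     count = {}
--     for item in lst:
--         for subitem in item:
--             if subitem not in count:
--                 count[subitem] = 1
--             else:
--                 count[subitem] += 1
--     for k,v in count.items():
--         if v == 1:
--             newuniquelist.append(k)
--
--     return newuniquelist
-- ===== SOURCE B (Python) =====
-- def listunique(lst):
--     seen = set()
--     dup = set()
--     for item in lst:
--         for x in item:
--             if x in seen:
--                 dup.add(x)
--             else:
--                 seen.add(x)
--     result = []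
--     for item in lst:
--         for x in item:
--             if x in seen and x not in dup:
--                 result.append(x)
--     return result
-- ===== Notes on version B (the rewrite author's own statement) =====
-- stated objective: idiomatic
-- what changed: Replaces the integer-count dictionary and its items() scan with two sets (seen/dup) maintained in one pass, then a second in-order pass over the nested lists emitting elements in seen but not in dup.
import Mathlib
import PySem

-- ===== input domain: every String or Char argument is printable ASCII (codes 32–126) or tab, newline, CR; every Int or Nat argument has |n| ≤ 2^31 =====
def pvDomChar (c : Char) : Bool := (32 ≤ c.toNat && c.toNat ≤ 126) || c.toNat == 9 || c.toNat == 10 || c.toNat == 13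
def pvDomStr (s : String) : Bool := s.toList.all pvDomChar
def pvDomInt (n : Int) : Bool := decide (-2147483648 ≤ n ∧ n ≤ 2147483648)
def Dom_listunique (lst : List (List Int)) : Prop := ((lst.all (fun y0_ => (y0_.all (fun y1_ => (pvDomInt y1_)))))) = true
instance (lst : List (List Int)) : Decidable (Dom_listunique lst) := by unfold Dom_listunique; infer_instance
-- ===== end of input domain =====

-- B replaces A's integer-count dictionary with two sets (seen/dup) built in one pass and a second in-order pass emitting the singletons; same behaviour, more idiomatic.


-- ===== PORT A =====
def listunique (lst : List (List Int)) : List Int :=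
  let count : PySem.Dict Int Int :=
    lst.foldl (fun c item =>
      item.foldl (fun c s =>
        if !(c.contains s) then c.insert s 1 else c.modify s 0 (· + 1)) c)
      PySem.Dict.empty
  count.items.foldl (fun acc kv => if kv.2 == 1 then acc ++ [kv.1] else acc) []

-- ===== PORT B =====
def listunique_alt (lst : List (List Int)) : List Int :=
  let sd : PySem.Set Int × PySem.Set Int :=
    lst.foldl (fun sd item =>
      item.foldl (fun sd x =>
        if PySem.Set.contains sd.1 x then (sd.1, PySem.Set.add sd.2 x)
        else (PySem.Set.add sd.1 x, sd.2)) sd)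
      (PySem.Set.empty, PySem.Set.empty)
  lst.foldl (fun res item =>
    item.foldl (fun res x =>
      if PySem.Set.contains sd.1 x && !(PySem.Set.contains sd.2 x) then res ++ [x] else res) res)
    []

-- ===== PRECONDITION & SPEC =====
def Spec_listunique (lst : List (List Int)) (out : List Int) : Prop := out = listunique_alt lst
instance (lst : List (List Int)) (out : List Int) : Decidable (Spec_listunique lst out) := by unfold Spec_listunique; infer_instance

-- ===== CLAIM (what is proved, stated in full; the proofs are below) =====
def Claim_equal_listunique : Prop := ∀ (lst : List (List Int)), Dom_listunique lst → Spec_listunique lst (listunique lst)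

-- ===== LEMMAS AND PROOFS =====

-- A's counting step is exactly Counter's step.
lemma a_step_eq :
    (fun (c : PySem.Dict Int Int) (s : Int) =>
      if !(c.contains s) then c.insert s 1 else c.modify s 0 (· + 1))
    = (fun (c : PySem.Dict Int Int) (s : Int) => c.modify s 0 (· + 1)) := by
  funext c s
  by_cases h : c.contains s = true
  · simp [h]
  · have h0 : c.contains s = false := eq_false_of_ne_true h
    simp [h0, PySem.Dict.modify, PySem.Dict.getD_of_not_contains c (0 : Int) h0]

-- filtering set(xs) by a predicate only true of singletons = filtering xs itself
lemma filter_ofList_of_singleton (q : Int → Bool) :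
    ∀ (xs : List Int), (∀ x ∈ xs, q x = true → xs.count x ≤ 1) →
      (PySem.Set.ofList xs).filter q = xs.filter q := by
  intro xs
  induction xs with
  | nil => intro _; simp [PySem.Set.ofList_nil]
  | cons a l ih =>
    intro h
    rw [PySem.Set.ofList_cons]
    have hl : ∀ x ∈ l, q x = true → l.count x ≤ 1 := by
      intro x hx hq
      have h2 := h x (List.mem_cons_of_mem a hx) hq
      have h3 : l.count x ≤ (a :: l).count x := by
        rw [List.count_cons]; split <;> omega
      omega
    by_cases hqa : q a = true
    · have hcnt : (a :: l).count a ≤ 1 := h a List.mem_cons_self hqa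
      have hal : a ∉ l := by
        intro hmem
        have hp := List.count_pos_iff.mpr hmem
        rw [List.count_cons_self] at hcnt
        omega
      have hdisc : (PySem.Set.ofList l).discard a = PySem.Set.ofList l := by
        apply List.filter_eq_self.mpr
        intro x hx
        have hxl : x ∈ l := (PySem.Set.mem_ofList l x).mp hx
        have hxa : x ≠ a := fun e => hal (e ▸ hxl)
        simp [hxa]
      rw [hdisc]
      rw [List.filter_cons_of_pos hqa, List.filter_cons_of_pos hqa, ih hl]
    · rw [List.filter_cons_of_neg hqa, List.filter_cons_of_neg hqa]
      rw [← ih hl, PySem.Set.discard, List.filter_comm]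
      have hfun : ((PySem.Set.ofList l).filter (fun y => !(y == a))).filter q
          = (PySem.Set.ofList l).filter (fun y => q y) := by
        rw [List.filter_filter]
        apply List.filter_congr
        intro y _
        by_cases hy : y = a
        · subst hy; simp [eq_false_of_ne_true hqa]
        · simp [hy]
      rw [List.filter_comm] at hfun
      simpa using hfun

-- B's first pass: membership in the two accumulated sets
lemma pass1_mem (l : List Int) : ∀ (seen dup : PySem.Set Int) (y : Int),
    (y ∈ (l.foldl (fun sd x =>
        if PySem.Set.contains sd.1 x then (sd.1, PySem.Set.add sd.2 x)
        else (PySem.Set.add sd.1 x, sd.2)) (seen, dup)).1 ↔ y ∈ seen ∨ y ∈ l) ∧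
    (y ∈ (l.foldl (fun sd x =>
        if PySem.Set.contains sd.1 x then (sd.1, PySem.Set.add sd.2 x)
        else (PySem.Set.add sd.1 x, sd.2)) (seen, dup)).2 ↔
      y ∈ dup ∨ (y ∈ l ∧ (y ∈ seen ∨ 2 ≤ l.count y))) := by
  induction l with
  | nil => intro seen dup y; simp
  | cons x t ih =>
    intro seen dup y
    by_cases hx : x ∈ seen
    · have hc : PySem.Set.contains seen x = true := (PySem.Set.contains_iff seen x).mpr hx
      have hstep : (x :: t).foldl (fun sd x =>
          if PySem.Set.contains sd.1 x then (sd.1, PySem.Set.add sd.2 x)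
          else (PySem.Set.add sd.1 x, sd.2)) (seen, dup)
          = t.foldl (fun sd x =>
          if PySem.Set.contains sd.1 x then (sd.1, PySem.Set.add sd.2 x)
          else (PySem.Set.add sd.1 x, sd.2)) (seen, PySem.Set.add dup x) := by
        simp [hx]
      rw [hstep]
      obtain ⟨ih1, ih2⟩ := ih seen (PySem.Set.add dup x) y
      constructor
      · rw [ih1]
        constructor
        · rintro (h | h)
          · exact Or.inl h
          · exact Or.inr (List.mem_cons_of_mem x h)
        · rintro (h | h)
          · exact Or.inl h
          · rcases List.mem_cons.mp h with h | h
            · exact Or.inl (h ▸ hx)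
            · exact Or.inr h
      · rw [ih2, PySem.Set.mem_add]
        by_cases hyx : y = x
        · subst hyx
          simp only [List.mem_cons, true_or, true_and]
          tauto
        · have h0 : (if (x == y) = true then (1 : Nat) else 0) = 0 := by
            simp [beq_iff_eq, Ne.symm hyx]
          simp only [List.mem_cons, hyx, false_or, or_false, List.count_cons, h0,
            add_zero]
    · have hc : PySem.Set.contains seen x = false := by
        rw [← Bool.not_eq_true]
        intro h; exact hx ((PySem.Set.contains_iff seen x).mp h)
      have hstep : (x :: t).foldl (fun sd x =>
          if PySem.Set.contains sd.1 x then (sd.1, PySem.Set.add sd.2 x)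
          else (PySem.Set.add sd.1 x, sd.2)) (seen, dup)
          = t.foldl (fun sd x =>
          if PySem.Set.contains sd.1 x then (sd.1, PySem.Set.add sd.2 x)
          else (PySem.Set.add sd.1 x, sd.2)) (PySem.Set.add seen x, dup) := by
        simp [hx]
      rw [hstep]
      obtain ⟨ih1, ih2⟩ := ih (PySem.Set.add seen x) dup y
      constructor
      · rw [ih1, PySem.Set.mem_add]
        by_cases hyx : y = x <;> simp [hyx, List.mem_cons]
      · rw [ih2, PySem.Set.mem_add]
        by_cases hyx : y = x
        · subst hyx
          constructor
          · rintro (hd | ⟨ht, _⟩)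
            · exact Or.inl hd
            · refine Or.inr ⟨List.mem_cons_self, Or.inr ?_⟩
              rw [List.count_cons_self]
              have := List.count_pos_iff.mpr ht
              omega
          · rintro (hd | ⟨_, hs | hc2⟩)
            · exact Or.inl hd
            · exact absurd hs hx
            · rw [List.count_cons_self] at hc2
              have ht : y ∈ t := List.count_pos_iff.mp (by omega)
              exact Or.inr ⟨ht, Or.inl (Or.inr rfl)⟩
        · have h0 : (if (x == y) = true then (1 : Nat) else 0) = 0 := by
            simp [beq_iff_eq, Ne.symm hyx]
          simp only [List.mem_cons, hyx, false_or, or_false, List.count_cons, h0,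
            add_zero]

-- B's second pass over a state with the stated memberships is the singleton filter
lemma second_pass (F : List Int) (S D : PySem.Set Int)
    (hS : ∀ y, y ∈ S ↔ y ∈ F) (hD : ∀ y, y ∈ D ↔ 2 ≤ F.count y) :
    F.foldl (fun res x =>
        if PySem.Set.contains S x && !(PySem.Set.contains D x) then res ++ [x] else res) []
      = F.filter (fun x => F.count x == 1) := by
  rw [PySem.List.foldl_append_if
    (p := fun x => PySem.Set.contains S x && !(PySem.Set.contains D x)) (f := fun a => a)]
  rw [List.map_id', List.nil_append]
  apply List.filter_congr
  intro x hx
  have hc1 : PySem.Set.contains S x = true :=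
    (PySem.Set.contains_iff S x).mpr ((hS x).mpr hx)
  have hcnt := List.count_pos_iff.mpr hx
  by_cases h2c : 2 ≤ F.count x
  · have hc2 : PySem.Set.contains D x = true :=
      (PySem.Set.contains_iff D x).mpr ((hD x).mpr h2c)
    rw [hc1, hc2]
    simp only [Bool.not_true, Bool.and_false]
    symm
    rw [beq_eq_false_iff_ne]
    omega
  · have hc2 : PySem.Set.contains D x = false := by
      rw [← Bool.not_eq_true]
      intro h; exact h2c ((hD x).mp ((PySem.Set.contains_iff D x).mp h))
    rw [hc1, hc2]
    simp only [Bool.not_false, Bool.and_true]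
    symm
    rw [beq_iff_eq]
    omega

-- cast normalisation for A's comparison v == 1 over Int values
lemma beq_cast_one (c : Nat) : ((c : Int) == 1) = (c == 1) := by
  by_cases hk : c = 1
  · simp [hk]
  · simp [hk, Nat.cast_eq_one]

-- the common normal form: elements of the flattened list occurring exactly once, in order
lemma listunique_eq_filter (lst : List (List Int)) :
    listunique lst = lst.flatten.filter (fun x => lst.flatten.count x == 1) := by
  conv_lhs => simp only [listunique]
  rw [← List.foldl_flatten, a_step_eq, ← PySem.Dict.counter_eq_foldl]
  rw [PySem.List.foldl_append_if (p := fun kv : Int × Int => kv.2 == 1) (f := Prod.fst)]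
  rw [PySem.Dict.items_counter, List.filter_map, List.map_map]
  simp only [Function.comp_def, beq_cast_one]
  rw [List.map_id', List.nil_append]
  apply filter_ofList_of_singleton
  intro x _ hq
  have := beq_iff_eq.mp hq
  omega

lemma listunique_alt_eq_filter (lst : List (List Int)) :
    listunique_alt lst = lst.flatten.filter (fun x => lst.flatten.count x == 1) := by
  conv_lhs => simp only [listunique_alt]
  rw [← List.foldl_flatten, ← List.foldl_flatten]
  apply second_pass
  · intro y
    have h1 := (pass1_mem lst.flatten PySem.Set.empty PySem.Set.empty y).1
    rw [h1]
    simp [PySem.Set.empty]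
  · intro y
    have h2 := (pass1_mem lst.flatten PySem.Set.empty PySem.Set.empty y).2
    rw [h2]
    constructor
    · rintro (h | ⟨_, h | h⟩)
      · simp [PySem.Set.empty] at h
      · simp [PySem.Set.empty] at h
      · exact h
    · intro h
      exact Or.inr ⟨List.count_pos_iff.mp (by omega), Or.inr h⟩

-- ===== VERDICT (by name: the statement is the Claim_ definition above) =====
theorem listunique_spec : Claim_equal_listunique := by
  intro lst _
  unfold Spec_listunique
  rw [listunique_eq_filter, listunique_alt_eq_filter]
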